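-- pv_equiv track=rewrite | github.com/TeeJayYang/Prep | misc/Tickets.py | findDest
-- ===== SOURCE A (Python) =====
-- def findDest(tickets, dest=None):
--     d = {}
--     for t in tickets:
--         d[t[0]] = t[1]
--     if dest is None:
--         dest = tickets[0][0]
--     while dest in d:
--         dest = d[dest]
--     return dest
-- ===== SOURCE B (Python) =====
-- def findDest(tickets, dest=None):
--     # Binary lifting: g starts as the one-step successor map (last ticket wins);
--     # squaring g doubles the number of chain steps it performs at once. Once the
--     # step count reaches len(tickets), one lookup lands on the final destination
--     # (a terminating chain leaves the key set within <= len(tickets) steps, and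
--     # the final destination is a fixpoint of the step function).
--     if dest is None:
--         dest = tickets[0][0]
--     g = dict(tickets)
--     steps = 1
--     n = len(tickets)
--     while steps < n:
--         g = {k: g.get(v, v) for k, v in g.items()}
--         steps *= 2
--     return g.get(dest, dest)
-- ===== Notes on version B (the rewrite author's own statement) =====
-- stated objective: alternative
-- what changed: B replaces A's one-step-at-a-time chain walk by binary lifting: it builds the last-wins successor dict once, then repeatedly composes the map with itself (doubling the number of chain steps each squared map performs) until the step count reaches len(tickets), and finishes with a single lookup; correct because a terminating chain leaves the key set within len(tickets) steps and the final destination is a fixpoint of the step function.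
import Mathlib
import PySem

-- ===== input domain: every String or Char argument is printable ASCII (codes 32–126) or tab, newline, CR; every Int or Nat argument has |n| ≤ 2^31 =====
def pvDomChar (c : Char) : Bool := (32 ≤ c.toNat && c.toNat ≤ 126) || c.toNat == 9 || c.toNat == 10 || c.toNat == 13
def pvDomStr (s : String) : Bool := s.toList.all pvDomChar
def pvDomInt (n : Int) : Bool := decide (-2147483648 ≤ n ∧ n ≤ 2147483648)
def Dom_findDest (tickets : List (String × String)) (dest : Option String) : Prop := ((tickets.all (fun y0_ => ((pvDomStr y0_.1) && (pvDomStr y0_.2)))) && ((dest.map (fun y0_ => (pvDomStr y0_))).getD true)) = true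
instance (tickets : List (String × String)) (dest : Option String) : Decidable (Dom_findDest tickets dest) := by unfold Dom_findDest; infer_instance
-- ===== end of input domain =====

-- B replaces A's step-by-step chain walk by binary lifting: it repeatedly squares the
-- successor map (doubling the chain steps it performs at once) until the step count
-- reaches len(tickets), then answers with a single lookup; alternative algorithm.

-- ===== PORT A =====
-- while loop ported with fuel tickets.length + 1: inside Pre_ the chain leaves the key set
-- within ≤ tickets.length lookups (pigeonhole over the ≤ tickets.length distinct keys), so the
-- fuel never runs out on admitted inputs; outside Pre_ the Python loops forever (nothing claimed).
def findDestLoopA (d : PySem.Dict String String) : Nat → String → String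
  | 0, s => s
  | n+1, s =>
    match d.get? s with
    | some v => findDestLoopA d n v
    | none => s

def findDest (tickets : List (String × String)) (dest : Option String) : String :=
  let d : PySem.Dict String String := tickets.foldl (fun d t => d.insert t.1 t.2) PySem.Dict.empty
  let start : String :=
    match dest with
    | some s => s
    | none => ((PySem.List.pyGet? tickets 0).map Prod.fst).getD ""   -- tickets[0][0]; Pre_ excludes the IndexError case
  findDestLoopA d (tickets.length + 1) start

-- ===== PORT B =====
-- g = {k: g.get(v, v) for k, v in g.items()}  (keys of g are distinct, so ofList appends them in order)
def fdSquare (g : PySem.Dict String String) : PySem.Dict String String :=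
  PySem.Dict.ofList (g.items.map (fun kv => (kv.1, g.getD kv.2 kv.2)))

-- while steps < n: g = square(g); steps *= 2 — ported with fuel n: steps doubles from 1,
-- so the loop runs at most log2(n)+1 ≤ n times and the fuel never runs out (the proof
-- only uses n ≤ steps * 2^fuel, which holds at the call since n ≤ 2^n).
def fdLift (n : Nat) : Nat → Nat → PySem.Dict String String → PySem.Dict String String
  | 0, _, g => g
  | f+1, steps, g => if steps < n then fdLift n f (steps * 2) (fdSquare g) else g

def findDest_alt (tickets : List (String × String)) (dest : Option String) : String :=
  let start : String :=
    match dest with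
    | some s => s
    | none => ((PySem.List.pyGet? tickets 0).map Prod.fst).getD ""   -- tickets[0][0]
  let g : PySem.Dict String String := PySem.Dict.ofList tickets     -- dict(tickets), last wins
  (fdLift tickets.length tickets.length 1 g).getD start start

-- ===== PRECONDITION & SPEC =====
-- helpers for Pre_ (independent of both ports): last ticket target for a source, chain step, start
def pvLast_findDest (tickets : List (String × String)) (s : String) : Option String :=
  ((tickets.filter (fun t => t.1 == s)).getLast?).map Prod.snd
def pvNext_findDest (tickets : List (String × String)) (s : String) : String :=
  (pvLast_findDest tickets s).getD s
def pvStart_findDest (tickets : List (String × String)) (dest : Option String) : String :=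
  match dest with
  | some s => s
  | none => (tickets.headD ("", "")).1

-- Pre_ excludes exactly the inputs where the Python A does not return: dest=None with empty
-- tickets (IndexError), and inputs whose destination chain never leaves the source set (the
-- while loop diverges); the bound tickets.length is pigeonhole-tight, not a size cap.
def Pre_findDest (tickets : List (String × String)) (dest : Option String) : Prop :=
  (dest = none → tickets ≠ []) ∧
  ∃ n < tickets.length + 1,
    pvLast_findDest tickets ((pvNext_findDest tickets)^[n] (pvStart_findDest tickets dest)) = none
instance (tickets : List (String × String)) (dest : Option String) : Decidable (Pre_findDest tickets dest) := by unfold Pre_findDest; infer_instance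

def pvWitness_findDest : (List (String × String)) × Option String := ([("a", "b"), ("b", "c")], none)

def Spec_findDest (tickets : List (String × String)) (dest : Option String) (out : String) : Prop := out = findDest_alt tickets dest
instance (tickets : List (String × String)) (dest : Option String) (out : String) : Decidable (Spec_findDest tickets dest out) := by unfold Spec_findDest; infer_instance

-- ===== CLAIM (what is proved, stated in full; the proofs are below) =====
def Claim_equal_findDest : Prop := ∀ (tickets : List (String × String)) (dest : Option String), Dom_findDest tickets dest → Pre_findDest tickets dest → Spec_findDest tickets dest (findDest tickets dest)

-- ===== LEMMAS AND PROOFS =====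

-- the dict both ports build looks up the LAST ticket from a source (dict-overwrite semantics)
theorem fd_get?_build (tickets : List (String × String)) (k : String) :
    (tickets.foldl (fun d t => d.insert t.1 t.2) PySem.Dict.empty).get? k
      = pvLast_findDest tickets k := by
  induction tickets using List.reverseRecOn with
  | nil => rfl
  | append_singleton l t ih =>
    rw [List.foldl_append]
    simp only [List.foldl_cons, List.foldl_nil, PySem.Dict.get?_insert]
    by_cases h : t.1 = k
    · have h1 : pvLast_findDest (l ++ [t]) k = some t.2 := by
        unfold pvLast_findDest
        rw [List.filter_append]
        have h2 : List.filter (fun t' => t'.1 == k) [t] = [t] := by simp [h]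
        rw [h2, List.getLast?_concat]
        rfl
      rw [h1, if_pos h.symm]
    · have h1 : pvLast_findDest (l ++ [t]) k = pvLast_findDest l k := by
        unfold pvLast_findDest
        rw [List.filter_append]
        have h2 : List.filter (fun t' => t'.1 == k) [t] = [] := by simp [h]
        rw [h2, List.append_nil]
      rw [h1, if_neg (fun he => h he.symm)]
      exact ih

-- a source with no ticket is a fixpoint of the step function
theorem fd_iter_fix (tickets : List (String × String)) (s : String)
    (h : pvLast_findDest tickets s = none) (m : Nat) :
    (pvNext_findDest tickets)^[m] s = s := by
  induction m with
  | zero => rfl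
  | succ m ih =>
    rw [Function.iterate_succ_apply]
    have hs : pvNext_findDest tickets s = s := by unfold pvNext_findDest; rw [h]; rfl
    rw [hs, ih]

theorem fd_iter_absorb (tickets : List (String × String)) (s : String) (j m : Nat)
    (h : pvLast_findDest tickets ((pvNext_findDest tickets)^[j] s) = none) (hjm : j ≤ m) :
    (pvNext_findDest tickets)^[m] s = (pvNext_findDest tickets)^[j] s := by
  have hm : m = (m - j) + j := by omega
  rw [hm, Function.iterate_add_apply]
  exact fd_iter_fix tickets _ h (m - j)

-- A's while loop computes the j-th iterate once the chain is resolved within the fuel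
theorem fd_loopA (tickets : List (String × String)) :
    ∀ (fuel j : Nat) (s : String),
      pvLast_findDest tickets ((pvNext_findDest tickets)^[j] s) = none → j ≤ fuel →
      findDestLoopA (tickets.foldl (fun d t => d.insert t.1 t.2) PySem.Dict.empty) fuel s
        = (pvNext_findDest tickets)^[j] s := by
  intro fuel
  induction fuel with
  | zero =>
    intro j s hst hj
    interval_cases j
    simp only [Function.iterate_zero, id] at hst ⊢
    rfl
  | succ f ih =>
    intro j s hst hj
    simp only [findDestLoopA, fd_get?_build]
    cases h : pvLast_findDest tickets s with
    | none => exact (fd_iter_fix tickets s h j).symm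
    | some v =>
      cases j with
      | zero => simp only [Function.iterate_zero, id] at hst; rw [hst] at h; cases h
      | succ j' =>
        have hv : pvNext_findDest tickets s = v := by unfold pvNext_findDest; rw [h]; rfl
        have hst' : pvLast_findDest tickets ((pvNext_findDest tickets)^[j'] v) = none := by
          rw [← hv, ← Function.iterate_succ_apply]; exact hst
        rw [Function.iterate_succ_apply, hv]
        exact ih j' v hst' (by omega)

-- squaring the map rewrites each stored value through one more g-lookup (keys unchanged)
theorem fd_square_items (g : PySem.Dict String String) (hnd : g.keys.Nodup) :
    (fdSquare g).items = g.items.map (fun kv => (kv.1, g.getD kv.2 kv.2)) := by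
  unfold fdSquare
  have h3 : (List.foldl (fun (acc : PySem.Dict String String) (p : String × String) => acc.insert p.1 p.2)
        PySem.Dict.empty (g.items.map (fun kv => (kv.1, g.getD kv.2 kv.2)))).items
      = PySem.Dict.empty.items
        ++ (g.items.map (fun kv => (kv.1, g.getD kv.2 kv.2))).map (fun p => (p.1, p.2)) :=
    PySem.Dict.items_foldl_insert_fresh _ _ _ _ (fun a _ => rfl)
      (by simpa [List.map_map, Function.comp] using hnd)
  -- (the fresh-keys hypothesis is g's own Nodup key list)
  show (List.foldl (fun (acc : PySem.Dict String String) (p : String × String) => acc.insert p.1 p.2)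
      PySem.Dict.empty (g.items.map (fun kv => (kv.1, g.getD kv.2 kv.2)))).items = _
  rw [h3]
  simp only [List.map_map]
  rfl

theorem fd_square_keys (g : PySem.Dict String String) (hnd : g.keys.Nodup) :
    (fdSquare g).keys = g.keys := by
  show (fdSquare g).items.map (·.1) = g.items.map (·.1)
  rw [fd_square_items g hnd]
  simp

theorem fd_square_get? (g : PySem.Dict String String) (hnd : g.keys.Nodup) (x : String) :
    (fdSquare g).get? x = (g.get? x).map (fun v => g.getD v v) := by
  show Option.map (fun p => p.2) (List.find? (fun p => p.1 == x) (fdSquare g).items) = _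
  rw [fd_square_items g hnd, List.find?_map]
  show _ = Option.map (fun v => g.getD v v)
        (Option.map (fun p => p.2) (List.find? (fun p => p.1 == x) g.items))
  rw [Option.map_map, Option.map_map]
  congr 1

-- the lifting loop: from a map performing `steps` chain steps it returns a map
-- performing M ≥ n chain steps, provided the fuel covers the doublings
theorem fd_lift (tickets : List (String × String)) (n : Nat) :
    ∀ (fuel steps : Nat) (g : PySem.Dict String String),
      g.keys.Nodup →
      (∀ x, g.getD x x = (pvNext_findDest tickets)^[steps] x) →
      (∀ x, g.get? x = none ↔ pvLast_findDest tickets x = none) →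
      n ≤ steps * 2 ^ fuel →
      ∃ M, n ≤ M ∧ ∀ x, (fdLift n fuel steps g).getD x x = (pvNext_findDest tickets)^[M] x := by
  intro fuel
  induction fuel with
  | zero =>
    intro steps g _ hD _ hb
    exact ⟨steps, by simpa using hb, fun x => by simpa [fdLift] using hD x⟩
  | succ f ih =>
    intro steps g hnd hD hN hb
    by_cases hlt : steps < n
    · have hnd' : (fdSquare g).keys.Nodup := by rw [fd_square_keys g hnd]; exact hnd
      have hN' : ∀ x, (fdSquare g).get? x = none ↔ pvLast_findDest tickets x = none := by
        intro x
        rw [fd_square_get? g hnd x]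
        cases h : g.get? x <;> simp [← hN x, h]
      have hD' : ∀ x, (fdSquare g).getD x x = (pvNext_findDest tickets)^[steps * 2] x := by
        intro x
        have hs2 : steps * 2 = steps + steps := by omega
        rw [hs2, Function.iterate_add_apply]
        show ((fdSquare g).get? x).getD x = _
        rw [fd_square_get? g hnd x]
        cases h : g.get? x with
        | none =>
          have hfix : pvLast_findDest tickets x = none := (hN x).mp h
          rw [fd_iter_fix tickets x hfix steps, fd_iter_fix tickets x hfix steps]
          rfl
        | some v =>
          have hvx : g.getD x x = v := by show (g.get? x).getD x = v; rw [h]; rfl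
          have : (pvNext_findDest tickets)^[steps] x = v := by rw [← hD x, hvx]
          rw [this]
          exact hD v
      have hb' : n ≤ steps * 2 * 2 ^ f := by
        have : steps * 2 ^ (f + 1) = steps * 2 * 2 ^ f := by ring
        omega
      have := ih (steps * 2) (fdSquare g) hnd' hD' hN' hb'
      simpa [fdLift, hlt] using this
    · exact ⟨steps, by omega, fun x => by simpa [fdLift, hlt] using hD x⟩

-- both ports from a common start string: A walks j resolved steps, B lifts to M ≥ n ≥ j steps
theorem fd_core (tickets : List (String × String)) (start : String) (j : Nat)
    (hj : j ≤ tickets.length)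
    (hst : pvLast_findDest tickets ((pvNext_findDest tickets)^[j] start) = none) :
    findDestLoopA (tickets.foldl (fun d t => d.insert t.1 t.2) PySem.Dict.empty)
        (tickets.length + 1) start
      = (fdLift tickets.length tickets.length 1 (PySem.Dict.ofList tickets)).getD start start := by
  rw [fd_loopA tickets (tickets.length + 1) j start hst (by omega)]
  have hofList : PySem.Dict.ofList tickets
      = tickets.foldl (fun d t => d.insert t.1 t.2) PySem.Dict.empty := rfl
  have hD1 : ∀ x, (PySem.Dict.ofList tickets).getD x x = (pvNext_findDest tickets)^[1] x := by
    intro x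
    show ((PySem.Dict.ofList tickets).get? x).getD x = _
    rw [hofList, fd_get?_build]
    rfl
  have hN1 : ∀ x, (PySem.Dict.ofList tickets).get? x = none ↔ pvLast_findDest tickets x = none := by
    intro x
    rw [hofList, fd_get?_build]
  have hb1 : tickets.length ≤ 1 * 2 ^ tickets.length := by
    have := @Nat.lt_two_pow_self tickets.length
    omega
  obtain ⟨M, hM, hMx⟩ := fd_lift tickets tickets.length tickets.length 1
    (PySem.Dict.ofList tickets) (PySem.Dict.nodup_keys_ofList tickets) hD1 hN1 hb1
  rw [hMx start]
  exact (fd_iter_absorb tickets start j M hst (by omega)).symm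

-- ===== VERDICT (by name: the statement is the Claim_ definition above) =====
theorem findDest_spec : Claim_equal_findDest := by
  intro tickets dest _ hpre
  obtain ⟨hne, j, hj, hst⟩ := hpre
  unfold Spec_findDest
  cases dest with
  | some s => exact fd_core tickets s j (by omega) hst
  | none =>
    cases tickets with
    | nil => exact absurd rfl (hne rfl)
    | cons t ts =>
      have h0 : ((PySem.List.pyGet? (t :: ts) 0).map Prod.fst).getD "" = t.1 := by
        simp [pysem]
      show findDest (t :: ts) none = findDest_alt (t :: ts) none
      simp only [findDest, findDest_alt, h0]
      exact fd_core (t :: ts) t.1 j (by simp at hj ⊢; omega) hst
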